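-- pv_equiv track=rewrite | github.com/abdirahman232018/Kattis_Solutions | Coloring Socks.py | number_machines
-- ===== SOURCE A (Python) =====
-- def number_machines(colors,number_of_socks, laundary_machine_capacity, max_color_diff):
--     machines = 0
--     l = 0
--     while True:
--         if l >= number_of_socks:
--             break
--         else:
--             u = l + laundary_machine_capacity - 1
--
--             if u >= number_of_socks:
--                 u = number_of_socks - 1
--             while u >= l:
--                 if colors[u] - colors[l] <= max_color_diff:
--                     machines += 1
--                     l = u + 1
--                     break
--                 u -= 1
--
--     return machines
-- ===== SOURCE B (Python) =====
-- def number_machines(colors, number_of_socks, laundary_machine_capacity, max_color_diff):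
--     machines = 0
--     l = 0
--     n = number_of_socks
--     while l < n:
--         hi = min(l + laundary_machine_capacity - 1, n - 1)
--         # suffix minima of the window: suf[k] = min(colors[l+k .. hi])
--         suf = []
--         m = colors[hi]
--         for j in range(hi, l - 1, -1):
--             m = min(m, colors[j])
--             suf.append(m)
--         suf.reverse()
--         c = colors[l] + max_color_diff
--         # suf is non-decreasing, so "suf[k] <= c" holds on a prefix of k;
--         # binary search for the last k with suf[k] <= c: that l+k is the
--         # last sock this machine can take.
--         lo, r = 0, len(suf) - 1
--         while lo < r:
--             mid = (lo + r + 1) // 2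
--             if suf[mid] <= c:
--                 lo = mid
--             else:
--                 r = mid - 1
--         machines += 1
--         l = l + lo + 1
--     return machines
-- ===== Notes on version B (the rewrite author's own statement) =====
-- stated objective: alternative
-- what changed: Per machine B builds the window's suffix-minimum array (which makes the in-tolerance predicate monotone) and binary-searches it for the last sock the machine can take, instead of A's element-by-element downward scan with break.
-- outside the precondition, e.g. on number_machines([5, 1], 2, 2, -2): A returns 1, B returns 1
import Mathlib
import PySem

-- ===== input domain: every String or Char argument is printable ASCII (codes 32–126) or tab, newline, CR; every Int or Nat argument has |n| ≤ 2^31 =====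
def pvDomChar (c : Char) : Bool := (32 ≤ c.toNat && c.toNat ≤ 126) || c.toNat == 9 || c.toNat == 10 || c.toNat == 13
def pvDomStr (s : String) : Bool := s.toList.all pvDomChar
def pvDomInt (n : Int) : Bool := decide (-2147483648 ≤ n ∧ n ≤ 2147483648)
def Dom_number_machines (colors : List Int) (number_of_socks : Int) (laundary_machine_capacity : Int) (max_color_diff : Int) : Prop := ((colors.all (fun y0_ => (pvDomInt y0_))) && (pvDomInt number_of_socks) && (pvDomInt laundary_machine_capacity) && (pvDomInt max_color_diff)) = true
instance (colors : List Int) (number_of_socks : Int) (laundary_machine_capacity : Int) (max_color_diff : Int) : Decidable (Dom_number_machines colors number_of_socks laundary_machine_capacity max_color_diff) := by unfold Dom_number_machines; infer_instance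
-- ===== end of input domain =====

-- B replaces A's downward element-by-element scan for each machine's last sock by a different
-- algorithm: it builds the window's suffix-minimum array (making the tolerance test monotone)
-- and binary-searches it; same worst-case cost, genuinely different structure.
-- All loops carry a Nat fuel parameter solely as a totality guard (fuel is chosen large enough
-- that it never runs out on the iterations the Python performs inside Pre_).

-- ===== PORT A =====
-- inner 'while u >= l' loop of A: scans u downward, breaks at the first (largest) index whose
-- color is within tolerance of colors[l]; none = the Python loop falls through (A then diverges).
def numA_inner (colors : List Int) (d l : Int) : Int → Nat → Option Int
  | _, 0 => none
  | u, fuel + 1 =>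
    if l ≤ u then
      if PySem.List.pyGetD colors u 0 - PySem.List.pyGetD colors l 0 ≤ d then some u
      else numA_inner colors d l (u - 1) fuel
    else none

-- outer 'while True' loop of A; 'u = l + cap - 1, clamped to n - 1' is inlined into the call
def numA_loop (colors : List Int) (n cap d : Int) : Int → Int → Nat → Int
  | machines, _, 0 => machines
  | machines, l, fuel + 1 =>
    if l ≥ n then machines
    else
      match numA_inner colors d l (if l + cap - 1 ≥ n then n - 1 else l + cap - 1)
          (((if l + cap - 1 ≥ n then n - 1 else l + cap - 1) + 1 - l).toNat + 1) with
      | some u => numA_loop colors n cap d (machines + 1) (u + 1) fuel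
      | none => machines

def number_machines (colors : List Int) (number_of_socks : Int) (laundary_machine_capacity : Int) (max_color_diff : Int) : Int :=
  numA_loop colors number_of_socks laundary_machine_capacity max_color_diff 0 0 (number_of_socks.toNat + 1)

-- ===== PORT B =====
-- B's 'for j in range(hi, l-1, -1)' loop carrying m: the downward counter becomes a downward
-- recursion; Python's append-then-reverse pair becomes the equivalent cons accumulation.
def sufLoop (colors : List Int) (l : Int) : Int → Int → List Int → Nat → List Int
  | _, _, acc, 0 => acc
  | j, m, acc, fuel + 1 =>
    if l ≤ j then
      sufLoop colors l (j - 1) (min m (PySem.List.pyGetD colors j 0))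
        (min m (PySem.List.pyGetD colors j 0) :: acc) fuel
    else acc

-- B's 'while lo < r' binary-search loop; 'mid = (lo + r + 1) // 2' is written inline
def bsLoop (suf : List Int) (c : Int) : Int → Int → Nat → Int
  | lo, _, 0 => lo
  | lo, r, fuel + 1 =>
    if lo < r then
      if PySem.List.pyGetD suf (PySem.Int.floordiv (lo + r + 1) 2) 0 ≤ c then
        bsLoop suf c (PySem.Int.floordiv (lo + r + 1) 2) r fuel
      else bsLoop suf c lo (PySem.Int.floordiv (lo + r + 1) 2 - 1) fuel
    else lo

-- one iteration of B's while body: hi, suf, c and the binary-searched lo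
def numB_pick (colors : List Int) (n cap d l : Int) : Int :=
  let hi := min (l + cap - 1) (n - 1)
  let suf := sufLoop colors l hi (PySem.List.pyGetD colors hi 0) [] ((hi + 1 - l).toNat + 1)
  bsLoop suf (PySem.List.pyGetD colors l 0 + d) 0 ((suf.length : Int) - 1) (suf.length + 1)

-- B's 'while l < n' outer loop
def numB_loop (colors : List Int) (n cap d : Int) : Int → Int → Nat → Int
  | machines, _, 0 => machines
  | machines, l, fuel + 1 =>
    if l < n then
      numB_loop colors n cap d (machines + 1) (l + numB_pick colors n cap d l + 1) fuel
    else machines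

def number_machines_alt (colors : List Int) (number_of_socks : Int) (laundary_machine_capacity : Int) (max_color_diff : Int) : Int :=
  numB_loop colors number_of_socks laundary_machine_capacity max_color_diff 0 0 (number_of_socks.toNat + 1)

-- ===== PRECONDITION & SPEC =====
-- Pre_ excludes number_of_socks > len(colors), where A raises IndexError, and n > 0 with
-- laundary_machine_capacity < 1 or max_color_diff < 0, where A's inner loop can find no valid
-- sock and A then loops forever (a data-dependent divergence); B returns a count there instead.
def Pre_number_machines (colors : List Int) (number_of_socks : Int) (laundary_machine_capacity : Int) (max_color_diff : Int) : Prop :=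
  number_of_socks ≤ (colors.length : Int) ∧
  (number_of_socks ≤ 0 ∨ (1 ≤ laundary_machine_capacity ∧ 0 ≤ max_color_diff))
instance (colors : List Int) (number_of_socks : Int) (laundary_machine_capacity : Int) (max_color_diff : Int) : Decidable (Pre_number_machines colors number_of_socks laundary_machine_capacity max_color_diff) := by unfold Pre_number_machines; infer_instance

def pvWitness_number_machines : List Int × Int × Int × Int := ([1, 2, 5], 3, 2, 1)

def Spec_number_machines (colors : List Int) (number_of_socks : Int) (laundary_machine_capacity : Int) (max_color_diff : Int) (out : Int) : Prop := out = number_machines_alt colors number_of_socks laundary_machine_capacity max_color_diff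
instance (colors : List Int) (number_of_socks : Int) (laundary_machine_capacity : Int) (max_color_diff : Int) (out : Int) : Decidable (Spec_number_machines colors number_of_socks laundary_machine_capacity max_color_diff out) := by unfold Spec_number_machines; infer_instance

-- ===== CLAIM (what is proved, stated in full; the proofs are below) =====
def Claim_equal_number_machines : Prop := ∀ (colors : List Int) (number_of_socks : Int) (laundary_machine_capacity : Int) (max_color_diff : Int), Dom_number_machines colors number_of_socks laundary_machine_capacity max_color_diff → Pre_number_machines colors number_of_socks laundary_machine_capacity max_color_diff → Spec_number_machines colors number_of_socks laundary_machine_capacity max_color_diff (number_machines colors number_of_socks laundary_machine_capacity max_color_diff)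

-- ===== LEMMAS AND PROOFS =====

theorem pv_mid_bounds (lo r : Int) (h : lo < r) :
    lo + 1 ≤ PySem.Int.floordiv (lo + r + 1) 2 ∧ PySem.Int.floordiv (lo + r + 1) 2 ≤ r := by
  have h2 := PySem.Int.floordiv_two_mid_bounds (show lo + 1 ≤ r by omega)
  rw [show lo + 1 + r = lo + r + 1 by ring] at h2
  exact h2

-- min of colors[j..hi] (= the value B's running m has after processing index j)
def wmin (colors : List Int) (hi j : Int) : Int :=
  if _h : j < hi then min (PySem.List.pyGetD colors j 0) (wmin colors hi (j + 1))
  else PySem.List.pyGetD colors hi 0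
termination_by (hi - j).toNat
decreasing_by omega

theorem wmin_le_get (colors : List Int) (hi j : Int) (h : j ≤ hi) :
    wmin colors hi j ≤ PySem.List.pyGetD colors j 0 := by
  rw [wmin]
  split_ifs with h1
  · exact min_le_left _ _
  · have : j = hi := by omega
    simp [this]

theorem wmin_mono (colors : List Int) (hi : Int) : ∀ j j', j ≤ j' → j' ≤ hi →
    wmin colors hi j ≤ wmin colors hi j' := by
  intro j j' hle hhi
  induction hk : (j' - j).toNat generalizing j with
  | zero =>
    have : j = j' := by omega
    simp [this]
  | succ k ih =>
    have hj : j < j' := by omega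
    have h1 : wmin colors hi j ≤ wmin colors hi (j + 1) := by
      rw [wmin]
      split_ifs with h2
      · exact min_le_right _ _
      · have : j + 1 = hi := by omega
        simp [this, wmin]
    exact le_trans h1 (ih (j + 1) (by omega) (by omega))

-- characterization of numA_inner's pick
theorem numA_inner_spec (colors : List Int) (d l : Int) : ∀ fuel u v,
    numA_inner colors d l u fuel = some v →
    l ≤ v ∧ v ≤ u ∧ PySem.List.pyGetD colors v 0 - PySem.List.pyGetD colors l 0 ≤ d ∧
      ∀ i, v < i → i ≤ u → ¬ (PySem.List.pyGetD colors i 0 - PySem.List.pyGetD colors l 0 ≤ d) := by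
  intro fuel
  induction fuel with
  | zero => intro u v h; cases h
  | succ m ih =>
    intro u v h
    rw [numA_inner] at h
    by_cases h1 : l ≤ u
    · rw [if_pos h1] at h
      by_cases h2 : PySem.List.pyGetD colors u 0 - PySem.List.pyGetD colors l 0 ≤ d
      · rw [if_pos h2] at h
        cases h
        exact ⟨h1, le_refl _, h2, fun i hi1 hi2 _ => by omega⟩
      · rw [if_neg h2] at h
        obtain ⟨a1, a2, a3, a4⟩ := ih (u - 1) v h
        refine ⟨a1, by omega, a3, fun i hi1 hi2 hv => ?_⟩
        by_cases hiu : i = u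
        · exact h2 (hiu ▸ hv)
        · exact a4 i hi1 (by omega) hv
    · rw [if_neg h1] at h
      cases h

theorem numA_inner_total (colors : List Int) (d l : Int) (hd : 0 ≤ d) : ∀ fuel u,
    (u + 1 - l).toNat < fuel → l ≤ u → ∃ v, numA_inner colors d l u fuel = some v := by
  intro fuel
  induction fuel with
  | zero => intro u h; omega
  | succ m ih =>
    intro u hf hlu
    rw [numA_inner, if_pos hlu]
    by_cases h2 : PySem.List.pyGetD colors u 0 - PySem.List.pyGetD colors l 0 ≤ d
    · rw [if_pos h2]
      exact ⟨u, rfl⟩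
    · rw [if_neg h2]
      by_cases hul : l ≤ u - 1
      · exact ih (u - 1) (by omega) hul
      · have : u = l := by omega
        subst this
        exact absurd (by omega) h2

-- the list sufLoop builds: [wmin l, wmin (l+1), …, wmin j] ++ acc
def mapw (colors : List Int) (hi : Int) (l j : Int) : List Int :=
  if _h : l ≤ j then wmin colors hi l :: mapw colors hi (l + 1) j else []
termination_by (j + 1 - l).toNat
decreasing_by omega

theorem mapw_snoc (colors : List Int) (hi : Int) : ∀ l j, l ≤ j →
    mapw colors hi l j = mapw colors hi l (j - 1) ++ [wmin colors hi j] := by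
  intro l j hle
  induction hk : (j - l).toNat generalizing l with
  | zero =>
    have : l = j := by omega
    subst this
    simp [mapw, show ¬ (l ≤ l - 1) by omega, show ¬ (l + 1 ≤ l) by omega]
  | succ k ih =>
    conv_lhs => rw [mapw]
    simp only [dif_pos hle]
    rw [ih (l + 1) (by omega) (by omega)]
    conv_rhs => rw [mapw]
    simp only [dif_pos (show l ≤ j - 1 by omega)]
    simp

theorem sufLoop_spec (colors : List Int) (hi l : Int) : ∀ fuel j acc,
    (j + 1 - l).toNat < fuel → j ≤ hi →
    sufLoop colors l j (wmin colors hi (j + 1)) acc fuel = mapw colors hi l j ++ acc := by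
  intro fuel
  induction fuel with
  | zero => intro j acc h; omega
  | succ k ih =>
    intro j acc hf hj
    by_cases hlj : l ≤ j
    · rw [sufLoop]
      simp only [if_pos hlj]
      have hm : min (wmin colors hi (j + 1)) (PySem.List.pyGetD colors j 0) = wmin colors hi j := by
        conv_rhs => rw [wmin]
        split_ifs with h1
        · exact min_comm _ _
        · have hj' : j = hi := by omega
          subst hj'
          have hw : wmin colors j (j + 1) = PySem.List.pyGetD colors j 0 := by
            rw [wmin]; simp [show ¬ (j + 1 < j) by omega]
          rw [hw, min_self]
      have hrec := ih (j - 1) (min (wmin colors hi (j + 1)) (PySem.List.pyGetD colors j 0) :: acc) (by omega) (by omega)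
      rw [show j - 1 + 1 = j by ring] at hrec
      rw [hm] at hrec
      rw [hm, hrec, mapw_snoc colors hi l j hlj]
      simp
    · rw [sufLoop, mapw]
      simp [hlj]

theorem mapw_length (colors : List Int) (hi : Int) : ∀ l j, (mapw colors hi l j).length = (j + 1 - l).toNat := by
  intro l j
  induction hk : (j + 1 - l).toNat generalizing l with
  | zero => rw [mapw]; simp [show ¬ (l ≤ j) by omega]
  | succ k ih =>
    rw [mapw]
    simp only [dif_pos (show l ≤ j by omega), List.length_cons]
    rw [ih (l + 1) (by omega)]

theorem mapw_get (colors : List Int) (hi : Int) : ∀ l j k, 0 ≤ k → l + k ≤ j →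
    PySem.List.pyGetD (mapw colors hi l j) k 0 = wmin colors hi (l + k) := by
  intro l j k hk hlk
  induction hn : k.toNat generalizing l k with
  | zero =>
    have : k = 0 := by omega
    subst this
    rw [mapw]
    simp [show l ≤ j by omega, PySem.List.pyGetD_zero_cons]
  | succ m ih =>
    rw [mapw]
    simp only [dif_pos (show l ≤ j by omega)]
    have : PySem.List.pyGetD (wmin colors hi l :: mapw colors hi (l + 1) j) k 0
        = PySem.List.pyGetD (mapw colors hi (l + 1) j) (k - 1) 0 := by
      have : k = ((k - 1).toNat : Int) + 1 := by omega
      rw [this]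
      simp [PySem.List.pyGetD, PySem.List.pyGet?_cons_succ, PySem.List.pyGet?_natCast]
    rw [this, ih (l + 1) (k - 1) (by omega) (by omega) (by omega)]
    congr 1
    omega

-- binary-search correctness on the monotone predicate 'suf[k] ≤ c'
theorem bsLoop_spec (suf : List Int) (c w : Int)
    (mono : ∀ j k, 0 ≤ j → j ≤ k → k ≤ w - 1 → PySem.List.pyGetD suf k 0 ≤ c → PySem.List.pyGetD suf j 0 ≤ c) :
    ∀ fuel : Nat, ∀ lo r, (r - lo).toNat < fuel → 0 ≤ lo → lo ≤ r → r ≤ w - 1 →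
      PySem.List.pyGetD suf lo 0 ≤ c →
      (∀ k, r < k → k ≤ w - 1 → ¬ PySem.List.pyGetD suf k 0 ≤ c) →
      0 ≤ bsLoop suf c lo r fuel ∧ bsLoop suf c lo r fuel ≤ w - 1 ∧
        PySem.List.pyGetD suf (bsLoop suf c lo r fuel) 0 ≤ c ∧
        ∀ k, bsLoop suf c lo r fuel < k → k ≤ w - 1 → ¬ PySem.List.pyGetD suf k 0 ≤ c := by
  intro fuel
  induction fuel with
  | zero => intro lo r hf; omega
  | succ m ih =>
    intro lo r hf h0 hlr hrw hp ht
    by_cases hlt : lo < r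
    · have hmid := pv_mid_bounds lo r hlt
      rw [bsLoop]
      simp only [if_pos hlt]
      split_ifs with hc
      · exact ih (PySem.Int.floordiv (lo + r + 1) 2) r (by omega) (by omega) (by omega) hrw hc ht
      · refine ih lo (PySem.Int.floordiv (lo + r + 1) 2 - 1) (by omega) h0 (by omega) (by omega) hp ?_
        intro k hk1 hk2 hkc
        by_cases hkr : k ≤ r
        · exact hc (mono _ k (by omega) (by omega) (by omega) hkc)
        · exact ht k (by omega) hk2 hkc
    · rw [bsLoop]
      simp only [if_neg hlt]
      exact ⟨h0, by omega, hp, fun k hk1 hk2 => ht k (by omega) hk2⟩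

-- one step of the two outer loops picks the same last sock
theorem step_eq (colors : List Int) (n cap d l : Int)
    (h2 : l < n) (h4 : 1 ≤ cap) (h5 : 0 ≤ d) :
    ∀ fuel v, numA_inner colors d l (if l + cap - 1 ≥ n then n - 1 else l + cap - 1) fuel = some v →
      l + numB_pick colors n cap d l = v := by
  intro fuel v hv
  have hclamp : (if l + cap - 1 ≥ n then n - 1 else l + cap - 1) = min (l + cap - 1) (n - 1) := by
    split_ifs <;> omega
  rw [hclamp] at hv
  set hi := min (l + cap - 1) (n - 1) with hhi
  have hlhi : l ≤ hi := by omega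
  set c := PySem.List.pyGetD colors l 0 + d with hc
  have hw0 : wmin colors hi (hi + 1) = PySem.List.pyGetD colors hi 0 := by
    rw [wmin]; simp [show ¬ (hi + 1 < hi) by omega]
  have hsuf : sufLoop colors l hi (PySem.List.pyGetD colors hi 0) [] ((hi + 1 - l).toNat + 1) = mapw colors hi l hi := by
    rw [← hw0, sufLoop_spec colors hi l ((hi + 1 - l).toNat + 1) hi [] (by omega) (le_refl _)]
    simp
  set w : Int := hi - l + 1 with hwdef
  have hlenN : (mapw colors hi l hi).length = (hi + 1 - l).toNat := mapw_length colors hi l hi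
  have hlen : ((mapw colors hi l hi).length : Int) = w := by omega
  have hget : ∀ k, 0 ≤ k → k ≤ w - 1 →
      PySem.List.pyGetD (mapw colors hi l hi) k 0 = wmin colors hi (l + k) := by
    intro k hk1 hk2
    exact mapw_get colors hi l hi k hk1 (by omega)
  have hmono : ∀ j k, 0 ≤ j → j ≤ k → k ≤ w - 1 →
      PySem.List.pyGetD (mapw colors hi l hi) k 0 ≤ c → PySem.List.pyGetD (mapw colors hi l hi) j 0 ≤ c := by
    intro j k hj hjk hkw hkc
    rw [hget k (by omega) hkw] at hkc
    rw [hget j hj (by omega)]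
    exact le_trans (wmin_mono colors hi (l + j) (l + k) (by omega) (by omega)) hkc
  have hp0 : PySem.List.pyGetD (mapw colors hi l hi) 0 0 ≤ c := by
    rw [hget 0 (le_refl _) (by omega), add_zero]
    have := wmin_le_get colors hi l hlhi
    omega
  obtain ⟨b1, b2, b3, b4⟩ := bsLoop_spec (mapw colors hi l hi) c w hmono
    ((mapw colors hi l hi).length + 1) 0 (w - 1)
    (by omega) (le_refl _) (by omega) (by omega) hp0 (fun k hk1 hk2 => by omega)
  set res := bsLoop (mapw colors hi l hi) c 0 (w - 1) ((mapw colors hi l hi).length + 1) with hres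
  have hvalid : PySem.List.pyGetD colors (l + res) 0 ≤ c := by
    by_cases hend : res = w - 1
    · have heq : l + res = hi := by omega
      rw [hget res b1 b2, heq] at b3
      rw [heq]
      calc PySem.List.pyGetD colors hi 0 = wmin colors hi hi := by
            rw [wmin]; simp
        _ ≤ c := b3
    · have hnext := b4 (res + 1) (by omega) (by omega)
      rw [hget (res + 1) (by omega) (by omega)] at hnext
      rw [hget res b1 b2] at b3
      rw [wmin] at b3
      have hlt : l + res < hi := by omega
      rw [dif_pos hlt] at b3
      have heq : l + res + 1 = l + (res + 1) := by omega
      rw [heq] at b3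
      rcases le_total (PySem.List.pyGetD colors (l + res) 0) (wmin colors hi (l + (res + 1))) with hmin | hmin
      · rwa [min_eq_left hmin] at b3
      · rw [min_eq_right hmin] at b3; omega
  have hinval : ∀ i, l + res < i → i ≤ hi → ¬ PySem.List.pyGetD colors i 0 ≤ c := by
    intro i hi1 hi2 hic
    have hk := b4 (i - l) (by omega) (by omega)
    rw [hget (i - l) (by omega) (by omega)] at hk
    have heq : l + (i - l) = i := by omega
    rw [heq] at hk
    exact hk (le_trans (wmin_le_get colors hi i hi2) hic)
  obtain ⟨a1, a2, a3, a4⟩ := numA_inner_spec colors d l fuel hi v hv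
  have hveq : l + res = v := by
    by_contra hne
    rcases lt_or_gt_of_ne hne with hlt | hgt
    · exact hinval v hlt a2 (by omega)
    · exact a4 (l + res) hgt (by omega) (by omega)
  have hpick : numB_pick colors n cap d l = res := by
    simp only [numB_pick, ← hhi, ← hc, hsuf, hlen, hres]
  rw [hpick]
  exact hveq

-- the two outer loops agree, given enough fuel on both sides
theorem pv_loop_eq (colors : List Int) (n cap d : Int)
    (hpre : n ≤ (colors.length : Int) ∧ (n ≤ 0 ∨ (1 ≤ cap ∧ 0 ≤ d))) :
    ∀ fa : Nat, ∀ fb : Nat, ∀ l machines : Int, (n - l).toNat < fa → (n - l).toNat < fb → 0 ≤ l →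
      numA_loop colors n cap d machines l fa = numB_loop colors n cap d machines l fb := by
  intro fa
  induction fa with
  | zero => intro fb l machines hfa; omega
  | succ m ih =>
    intro fb l machines hfa hfb hl
    cases fb with
    | zero => omega
    | succ mb =>
      by_cases hln : l < n
      · have hcapd : 1 ≤ cap ∧ 0 ≤ d := by
          rcases hpre.2 with h | h
          · omega
          · exact h
        obtain ⟨hcap, hd⟩ := hcapd
        have hu : l ≤ (if l + cap - 1 ≥ n then n - 1 else l + cap - 1) := by split_ifs <;> omega
        obtain ⟨v, hv⟩ := numA_inner_total colors d l hd
          (((if l + cap - 1 ≥ n then n - 1 else l + cap - 1) + 1 - l).toNat + 1) _ (by omega) hu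
        have hstep := step_eq colors n cap d l hln hcap hd _ v hv
        have hvl : l ≤ v := (numA_inner_spec colors d l _ _ v hv).1
        rw [numA_loop, numB_loop]
        simp only [if_neg (show ¬ l ≥ n by omega), if_pos hln, hv]
        rw [hstep]
        exact ih mb (v + 1) (machines + 1) (by omega) (by omega) (by omega)
      · rw [numA_loop, numB_loop]
        simp [show l ≥ n by omega, hln]

-- ===== VERDICT (by name: the statement is the Claim_ definition above) =====
theorem number_machines_spec : Claim_equal_number_machines := by
  intro colors n cap d _ hpre
  unfold Spec_number_machines number_machines number_machines_alt
  exact pv_loop_eq colors n cap d ⟨hpre.1, hpre.2⟩ (n.toNat + 1) (n.toNat + 1) 0 0 (by omega) (by omega) (le_refl _)
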